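-- pv_equiv track=rewrite | github.com/sriasapu/TheRock | build_tools/github_actions/test_executable_scripts/test_runner.py | find_matching_gpu_arch
-- ===== SOURCE A (Python) =====
-- def find_matching_gpu_arch(gpu_arch: str, available_gpu_archs: set[str]) -> str | None:
--     """
--     Find the most specific GPU architecture in the set that matches the given GPU.
--
--     Tries in order from most specific to least specific:
--     # Example:
--     # find_matching_gpu_arch('gfx1151', {'gfx1151', 'gfx115X', 'gfx11X'}) gives 'gfx1151'
--     # find_matching_gpu_arch('gfx1151', {'gfx1150', 'gfx94X', 'gfx11X'}) gives 'gfx11X'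
--     - Wildcard matches (gfx115X, gfx11X, etc.)
--
--     Returns the matching architecture string or None if no match found.
--     """
--     if gpu_arch in available_gpu_archs:
--         return gpu_arch
--
--     # Start matching from the end (gfx115X) and go back till the 5th character (gfx11X)
--     # Return the top matching pattern
--     for i in range(len(gpu_arch) - 1, 4, -1):
--         pattern = gpu_arch[:i] + "X"
--         if pattern in available_gpu_archs:
--             return pattern
--
--     return None
-- ===== SOURCE B (Python) =====
-- def find_matching_gpu_arch(gpu_arch: str, available_gpu_archs: set[str]) -> str | None:
--     """Scan the available set once, keeping the longest matching candidate
--     (exact string wins immediately), instead of generating prefix patterns."""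
--     best = None
--     for s in available_gpu_archs:
--         if s == gpu_arch:
--             return gpu_arch
--         if (
--             s.endswith("X")
--             and 6 <= len(s) <= len(gpu_arch)
--             and s[:-1] == gpu_arch[: len(s) - 1]
--         ):
--             if best is None or len(best) < len(s):
--                 best = s
--     return best
-- ===== Notes on version B (the rewrite author's own statement) =====
-- stated objective: alternative
-- what changed: Instead of generating candidate prefix patterns from gpu_arch and probing the set from most to least specific, B scans the available set once with a local wildcard-match predicate and keeps the longest matching entry (returning immediately on an exact hit).
import Mathlib
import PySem

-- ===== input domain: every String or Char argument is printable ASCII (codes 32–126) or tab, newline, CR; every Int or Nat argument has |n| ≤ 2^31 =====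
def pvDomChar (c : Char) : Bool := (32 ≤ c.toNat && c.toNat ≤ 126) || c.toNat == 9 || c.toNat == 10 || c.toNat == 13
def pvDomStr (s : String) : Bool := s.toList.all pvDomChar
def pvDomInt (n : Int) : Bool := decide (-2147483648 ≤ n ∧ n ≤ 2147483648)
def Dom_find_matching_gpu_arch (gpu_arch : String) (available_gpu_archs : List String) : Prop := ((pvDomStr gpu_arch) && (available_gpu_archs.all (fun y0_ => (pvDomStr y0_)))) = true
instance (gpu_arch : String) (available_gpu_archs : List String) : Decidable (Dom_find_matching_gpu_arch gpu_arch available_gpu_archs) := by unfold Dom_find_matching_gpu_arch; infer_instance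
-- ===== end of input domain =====

-- B replaces A's specificity-ordered probing of generated prefix patterns by a single
-- scan of the available set that keeps the longest matching candidate (objective: alternative).

-- ===== PORT A =====
-- A's loop: 'for i in range(len(gpu_arch)-1, 4, -1): pattern = gpu_arch[:i] + "X"; if pattern in available: return pattern'
def goA (gl : List Char) (al : List (List Char)) : List Int → Option (List Char)
  | [] => none
  | i :: rest =>
    let pattern := PySem.List.slice gl none (some i) ++ ['X']
    if al.contains pattern then some pattern else goA gl al rest

def find_matching_gpu_arch (gpu_arch : String) (available_gpu_archs : List String) : Option String :=
  let gl := gpu_arch.toList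
  let al := available_gpu_archs.map String.toList
  if al.contains gl then some gpu_arch
  else
    (goA gl al (PySem.List.pyRange ((gl.length : Int) - 1) 4 (-1))).map String.ofList

-- ===== PORT B =====
-- s wildcard-matches gpu_arch: 's.endswith("X") and 6 <= len(s) <= len(gpu_arch) and s[:-1] == gpu_arch[:len(s)-1]'
def wildMatch (gl s : List Char) : Bool :=
  PySem.Chars.endswith s ['X'] && decide (6 ≤ s.length) && decide (s.length ≤ gl.length)
    && (PySem.List.slice s none (some (-1)) == PySem.List.slice gl none (some ((s.length : Int) - 1)))

-- B's single scan: exact hit returns at once; otherwise keep the longest wildcard match seen so far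
def goB (gl : List Char) : List (List Char) → Option (List Char) → Option (List Char)
  | [], best => best
  | s :: rest, best =>
    if s == gl then some gl
    else if wildMatch gl s then
      match best with
      | none => goB gl rest (some s)
      | some b => if b.length < s.length then goB gl rest (some s) else goB gl rest (some b)
    else goB gl rest best

def find_matching_gpu_arch_alt (gpu_arch : String) (available_gpu_archs : List String) : Option String :=
  (goB gpu_arch.toList (available_gpu_archs.map String.toList) none).map String.ofList

-- ===== PRECONDITION & SPEC =====
def Spec_find_matching_gpu_arch (gpu_arch : String) (available_gpu_archs : List String) (out : Option String) : Prop := out = find_matching_gpu_arch_alt gpu_arch available_gpu_archs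
instance (gpu_arch : String) (available_gpu_archs : List String) (out : Option String) : Decidable (Spec_find_matching_gpu_arch gpu_arch available_gpu_archs out) := by unfold Spec_find_matching_gpu_arch; infer_instance

-- ===== CLAIM (what is proved, stated in full; the proofs are below) =====
def Claim_equal_find_matching_gpu_arch : Prop := ∀ (gpu_arch : String) (available_gpu_archs : List String), Dom_find_matching_gpu_arch gpu_arch available_gpu_archs → Spec_find_matching_gpu_arch gpu_arch available_gpu_archs (find_matching_gpu_arch gpu_arch available_gpu_archs)

-- ===== LEMMAS AND PROOFS =====

-- the candidate pattern A builds at index i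
def pat (gl : List Char) (i : Nat) : List Char := gl.take i ++ ['X']

lemma pat_length (gl : List Char) (i : Nat) (h : i ≤ gl.length) :
    (pat gl i).length = i + 1 := by
  simp [pat, List.length_take, Nat.min_eq_left h]

-- B's wildcard test holds exactly on A's candidate patterns
lemma wildMatch_iff (gl s : List Char) :
    wildMatch gl s = true ↔ ∃ i : Nat, 5 ≤ i ∧ i < gl.length ∧ s = pat gl i := by
  unfold wildMatch
  simp only [Bool.and_eq_true, decide_eq_true_eq, beq_iff_eq, PySem.Chars.endswith_iff,
    PySem.List.slice_to_neg_one]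
  constructor
  · rintro ⟨⟨⟨hsuf, h6⟩, hle⟩, heq⟩
    refine ⟨s.length - 1, by omega, by omega, ?_⟩
    obtain ⟨t, ht⟩ := hsuf
    have hlen : ((s.length : Int) - 1) = ((s.length - 1 : Nat) : Int) := by omega
    rw [hlen, PySem.List.slice_to_natCast] at heq
    have hdl : s.dropLast = t := by rw [← ht]; simp
    rw [pat, ← heq, hdl, ← ht]
  · rintro ⟨i, h5, hlt, rfl⟩
    have hlen : (pat gl i).length = i + 1 := pat_length gl i (Nat.le_of_lt hlt)
    have hdl : (pat gl i).dropLast = gl.take i := by simp [pat]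
    refine ⟨⟨⟨⟨gl.take i, rfl⟩, by omega⟩, by omega⟩, ?_⟩
    rw [hdl, hlen]
    rw [show ((i+1 : Nat) : Int) - 1 = ((i : Nat) : Int) by omega, PySem.List.slice_to_natCast]

-- the property shared by both results when gl itself is not available:
-- none = no admissible pattern is available; some s = s is the available pattern of greatest index
def Pchar (gl : List Char) (al : List (List Char)) (o : Option (List Char)) : Prop :=
  match o with
  | none => ∀ i : Nat, 5 ≤ i → i < gl.length → pat gl i ∉ al
  | some s => ∃ i : Nat, 5 ≤ i ∧ i < gl.length ∧ s = pat gl i ∧ pat gl i ∈ al ∧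
      ∀ j : Nat, i < j → j < gl.length → pat gl j ∉ al

lemma Pchar_unique (gl : List Char) (al : List (List Char)) {o₁ o₂ : Option (List Char)}
    (h₁ : Pchar gl al o₁) (h₂ : Pchar gl al o₂) : o₁ = o₂ := by
  match o₁, o₂ with
  | none, none => rfl
  | none, some s =>
    obtain ⟨i, h5, hlt, _, hmem, _⟩ := h₂
    exact absurd hmem (h₁ i h5 hlt)
  | some s, none =>
    obtain ⟨i, h5, hlt, _, hmem, _⟩ := h₁
    exact absurd hmem (h₂ i h5 hlt)
  | some s, some t =>
    obtain ⟨i, hi5, hilt, hsi, himem, himax⟩ := h₁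
    obtain ⟨j, hj5, hjlt, htj, hjmem, hjmax⟩ := h₂
    have hij : i = j := by
      rcases Nat.lt_trichotomy i j with h | h | h
      · exact absurd hjmem (himax j h hjlt)
      · exact h
      · exact absurd himem (hjmax i h hilt)
    subst hij
    rw [hsi, htj]

-- B returns gl as soon as an exact hit is seen
lemma goB_of_mem (gl : List Char) (xs : List (List Char)) :
    ∀ (best : Option (List Char)), gl ∈ xs → goB gl xs best = some gl := by
  induction xs with
  | nil => intro best h; cases h
  | cons s rest ih =>
    intro best h
    by_cases hs : s = gl
    · simp [goB, hs]
    · have hmem : gl ∈ rest := by cases h with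
        | head => exact absurd rfl hs
        | tail _ h => exact h
      simp only [goB, beq_iff_eq, if_neg hs]
      split_ifs
      · cases best with
        | none => exact ih _ hmem
        | some b =>
          dsimp only
          split_ifs <;> exact ih _ hmem
      · exact ih _ hmem

-- the invariant of B's scan: best is the longest wildcard match among the processed prefix
def Qinv (gl : List Char) (l : List (List Char)) (b : Option (List Char)) : Prop :=
  (b = none ∧ ∀ s ∈ l, wildMatch gl s = false) ∨
  (∃ s, b = some s ∧ s ∈ l ∧ wildMatch gl s = true ∧
     ∀ t ∈ l, wildMatch gl t = true → t.length ≤ s.length)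

lemma goB_inv (gl : List Char) (xs : List (List Char)) :
    ∀ (seen : List (List Char)) (best : Option (List Char)), gl ∉ xs →
      Qinv gl seen best → Qinv gl (seen ++ xs) (goB gl xs best) := by
  induction xs with
  | nil => intro seen best _ hq; simpa [goB] using hq
  | cons s rest ih =>
    intro seen best hnm hq
    have hs : s ≠ gl := fun h => hnm (h ▸ List.mem_cons_self)
    have hnr : gl ∉ rest := fun h => hnm (List.mem_cons_of_mem _ h)
    have hseen : seen ++ s :: rest = (seen ++ [s]) ++ rest := by simp
    rw [hseen]
    simp only [goB, beq_iff_eq, if_neg hs]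
    by_cases hw : wildMatch gl s = true
    · rw [if_pos hw]
      cases best with
      | none =>
        apply ih (seen ++ [s]) (some s) hnr
        rcases hq with ⟨_, hall⟩ | ⟨b, hb, _⟩
        · refine Or.inr ⟨s, rfl, by simp, hw, ?_⟩
          intro t ht hwt
          rcases List.mem_append.mp ht with h | h
          · exact absurd hwt (by simp [hall t h])
          · simp at h; subst h; exact le_refl _
        · cases hb
      | some b =>
        rcases hq with ⟨hb, _⟩ | ⟨q, hq2, hbmem, hbw, hbmax⟩
        · cases hb
        · have hbe : q = b := (Option.some_inj.mp hq2).symm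
          subst hbe
          dsimp only
          by_cases hlen : q.length < s.length
          · rw [if_pos hlen]
            apply ih (seen ++ [s]) (some s) hnr
            refine Or.inr ⟨s, rfl, by simp, hw, ?_⟩
            intro t ht hwt
            rcases List.mem_append.mp ht with h | h
            · exact le_trans (hbmax t h hwt) (Nat.le_of_lt hlen)
            · simp at h; subst h; exact le_refl _
          · rw [if_neg hlen]
            apply ih (seen ++ [s]) (some q) hnr
            refine Or.inr ⟨q, rfl, List.mem_append.mpr (Or.inl hbmem), hbw, ?_⟩
            intro t ht hwt
            rcases List.mem_append.mp ht with h | h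
            · exact hbmax t h hwt
            · simp at h; subst h; omega
    · rw [if_neg hw]
      apply ih (seen ++ [s]) best hnr
      rcases hq with ⟨hb, hall⟩ | ⟨q, hq2, hbmem, hbw, hbmax⟩
      · refine Or.inl ⟨hb, ?_⟩
        intro t ht
        rcases List.mem_append.mp ht with h | h
        · exact hall t h
        · simp at h; subst h; simpa using hw
      · refine Or.inr ⟨q, hq2, List.mem_append.mpr (Or.inl hbmem), hbw, ?_⟩
        intro t ht hwt
        rcases List.mem_append.mp ht with h | h
        · exact hbmax t h hwt
        · simp at h; subst h; exact absurd hwt hw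

lemma goB_Pchar (gl : List Char) (al : List (List Char)) (h : gl ∉ al) :
    Pchar gl al (goB gl al none) := by
  have hinv := goB_inv gl al [] none h (Or.inl ⟨rfl, by simp⟩)
  rw [List.nil_append] at hinv
  rcases hinv with ⟨hb, hall⟩ | ⟨s, hb, hmem, hw, hmax⟩
  · rw [hb]
    intro i h5 hlt hmem
    have hf := hall _ hmem
    have ht : wildMatch gl (pat gl i) = true := (wildMatch_iff gl _).mpr ⟨i, h5, hlt, rfl⟩
    rw [ht] at hf
    simp at hf
  · rw [hb]
    obtain ⟨i, h5, hlt, rfl⟩ := (wildMatch_iff gl s).mp hw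
    refine ⟨i, h5, hlt, rfl, hmem, ?_⟩
    intro j hij hjlt hjmem
    have hwj : wildMatch gl (pat gl j) = true := (wildMatch_iff gl _).mpr ⟨j, by omega, hjlt, rfl⟩
    have := hmax _ hjmem hwj
    rw [pat_length gl j (Nat.le_of_lt hjlt), pat_length gl i (Nat.le_of_lt hlt)] at this
    omega

-- A's countdown also satisfies the characterisation
lemma goA_Pchar (gl : List Char) (al : List (List Char)) :
    ∀ (k : Nat) (a : Int), a = 4 + k → a ≤ (gl.length : Int) - 1 →
      (∀ j : Nat, (a : Int) < j → j < gl.length → pat gl j ∉ al) →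
      Pchar gl al (goA gl al (PySem.List.pyRange a 4 (-1))) := by
  intro k
  induction k with
  | zero =>
    intro a ha _ hmax
    rw [ha, PySem.List.pyRange_neg_one_eq_nil (by omega)]
    intro i h5 hlt
    exact hmax i (by omega) hlt
  | succ m ih =>
    intro a ha hle hmax
    rw [PySem.List.pyRange_neg_one_cons (by omega)]
    simp only [goA]
    have ha0 : (0:Int) ≤ a := by omega
    have hnat : a = ((a.toNat : Nat) : Int) := by omega
    have hslice : PySem.List.slice gl none (some a) = gl.take a.toNat := by
      conv_lhs => rw [hnat]
      rw [PySem.List.slice_to_natCast]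
    rw [hslice]
    have hpat : gl.take a.toNat ++ ['X'] = pat gl a.toNat := rfl
    rw [hpat]
    by_cases hc : al.contains (pat gl a.toNat)
    · rw [if_pos hc]
      refine ⟨a.toNat, by omega, by omega, rfl, List.contains_iff_mem.mp hc, ?_⟩
      intro j hij hjlt
      exact hmax j (by omega) hjlt
    · rw [if_neg hc]
      apply ih (a - 1) (by omega) (by omega)
      intro j hj hjlt
      by_cases hje : (j : Int) = a
      · have : j = a.toNat := by omega
        subst this
        exact fun hm => hc (List.contains_iff_mem.mpr hm)
      · exact hmax j (by omega) hjlt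

-- the two list-level computations agree when gl itself is not available
theorem main_list (gl : List Char) (al : List (List Char)) (h : gl ∉ al) :
    goA gl al (PySem.List.pyRange ((gl.length : Int) - 1) 4 (-1)) = goB gl al none := by
  have hB := goB_Pchar gl al h
  have hA : Pchar gl al (goA gl al (PySem.List.pyRange ((gl.length : Int) - 1) 4 (-1))) := by
    by_cases hn : 5 ≤ gl.length
    · exact goA_Pchar gl al (gl.length - 5) ((gl.length : Int) - 1) (by omega) (by omega)
        (fun j hj hjlt => absurd hj (by omega))
    · rw [PySem.List.pyRange_neg_one_eq_nil (by omega)]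
      simp only [goA, Pchar]
      intro i h5 hlt
      omega
  exact Pchar_unique gl al hA hB

-- ===== VERDICT (by name: the statement is the Claim_ definition above) =====
theorem find_matching_gpu_arch_spec : Claim_equal_find_matching_gpu_arch := by
  intro g avail _
  unfold Spec_find_matching_gpu_arch
  simp only [find_matching_gpu_arch, find_matching_gpu_arch_alt]
  by_cases hc : (avail.map String.toList).contains g.toList
  · rw [if_pos hc, goB_of_mem _ _ _ (List.contains_iff_mem.mp hc)]
    simp [String.ofList_toList]
  · rw [if_neg hc, main_list _ _ (fun hm => hc (List.contains_iff_mem.mpr hm))]
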